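-- pv_equiv track=rewrite | github.com/srijanarya/ai-finance-agency | platform_backend.py | ensure_compliance
-- ===== SOURCE A (Python) =====
-- def ensure_compliance(content: str) -> str:
--     """Apply financial compliance rules"""
--     replacements = [
--         ('guaranteed returns', 'potential returns'),
--         ('will definitely', 'may'),
--         ('risk-free', 'lower-risk'),
--         ('assured profits', 'historical performance')
--     ]
--
--     for old, new in replacements:
--         content = content.replace(old, new)
--
--     # Add disclaimer if missing
--     if 'Disclaimer:' not in content and 'finance' in content.lower():
--         content += '\n\n*Disclaimer: This content is for informational purposes only. Past performance does not guarantee future results.*'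
--
--     return content
-- ===== SOURCE B (Python) =====
-- _RULES = [
--     ('guaranteed returns', 'potential returns'),
--     ('will definitely', 'may'),
--     ('risk-free', 'lower-risk'),
--     ('assured profits', 'historical performance'),
-- ]
--
-- _DISCLAIMER = '\n\n*Disclaimer: This content is for informational purposes only. Past performance does not guarantee future results.*'
--
--
-- def ensure_compliance(content: str) -> str:
--     """Apply financial compliance rules in a single left-to-right scan."""
--     parts = []
--     i = 0
--     n = len(content)
--     while i < n:
--         for old, new in _RULES:
--             if content.startswith(old, i):
--                 parts.append(new)
--                 i += len(old)
--                 break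
--         else:
--             parts.append(content[i])
--             i += 1
--     result = ''.join(parts)
--     if 'Disclaimer:' not in result and 'finance' in result.lower():
--         result += _DISCLAIMER
--     return result
-- ===== Notes on version B (the rewrite author's own statement) =====
-- stated objective: alternative
-- what changed: B replaces A's four sequential full-string str.replace passes by one single left-to-right scan that, at each position, emits the first matching rule's replacement (or copies the character) into a parts accumulator joined at the end, then appends the same disclaimer under the same condition; correctness relies on the four keys/replacements never overlapping or re-creating each other.
import Mathlib
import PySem

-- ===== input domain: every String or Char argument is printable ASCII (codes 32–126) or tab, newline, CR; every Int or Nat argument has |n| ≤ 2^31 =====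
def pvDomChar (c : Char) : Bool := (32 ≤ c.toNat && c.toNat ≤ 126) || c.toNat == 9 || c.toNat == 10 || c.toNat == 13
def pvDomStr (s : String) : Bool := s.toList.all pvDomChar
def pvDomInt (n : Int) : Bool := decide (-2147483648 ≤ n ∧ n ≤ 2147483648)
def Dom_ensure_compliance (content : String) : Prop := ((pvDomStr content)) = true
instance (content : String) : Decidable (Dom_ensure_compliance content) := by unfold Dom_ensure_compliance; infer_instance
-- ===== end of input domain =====

-- B replaces A's four sequential str.replace passes by one single left-to-right scan
-- that emits the first matching rule's replacement into a parts accumulator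
-- (alternative decomposition, same result).

-- ===== PORT A =====
-- the literal 4-element replacements list A loops over with str.replace
def aRepls : List (List Char × List Char) :=
  [("guaranteed returns".toList, "potential returns".toList),
   ("will definitely".toList, "may".toList),
   ("risk-free".toList, "lower-risk".toList),
   ("assured profits".toList, "historical performance".toList)]

-- "if 'Disclaimer:' not in content and 'finance' in content.lower(): content += …; return content"
def aFinish (r : List Char) : String :=
  if !(PySem.Chars.isIn "Disclaimer:".toList r) && PySem.Chars.isIn "finance".toList (PySem.Chars.lower r)
  then String.ofList (r ++ "\n\n*Disclaimer: This content is for informational purposes only. Past performance does not guarantee future results.*".toList)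
  else String.ofList r

def ensure_compliance (content : String) : String :=
  aFinish (aRepls.foldl (fun acc p => PySem.Chars.replace acc p.1 p.2) content.toList)

-- ===== PORT B =====
-- the four rules of Source B, keys and replacements
def bK1 : List Char := "guaranteed returns".toList
def bR1 : List Char := "potential returns".toList
def bK2 : List Char := "will definitely".toList
def bR2 : List Char := "may".toList
def bK3 : List Char := "risk-free".toList
def bR3 : List Char := "lower-risk".toList
def bK4 : List Char := "assured profits".toList
def bR4 : List Char := "historical performance".toList

-- Source B's while loop: parts is the forward accumulator ('parts.append' = append right,
-- ''.join(parts) = the accumulator itself); at each position the first rule whose key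
-- starts here is applied (skip the key, emit its replacement), else copy the char.
def bScan : List Char → List Char → List Char
  | parts, [] => parts
  | parts, c :: t =>
    if bK1.isPrefixOf (c :: t) then bScan (parts ++ bR1) (t.drop 17)
    else if bK2.isPrefixOf (c :: t) then bScan (parts ++ bR2) (t.drop 14)
    else if bK3.isPrefixOf (c :: t) then bScan (parts ++ bR3) (t.drop 8)
    else if bK4.isPrefixOf (c :: t) then bScan (parts ++ bR4) (t.drop 14)
    else bScan (parts ++ [c]) t
  termination_by _ l => l.length
  decreasing_by all_goals (simp [List.length_drop]; try omega)

-- "if 'Disclaimer:' not in result and 'finance' in result.lower(): result += …"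
-- (Python's short-circuit 'and' written as nested ifs)
def bFinish (result : List Char) : String :=
  if PySem.Chars.isIn "Disclaimer:".toList result then String.ofList result
  else if PySem.Chars.isIn "finance".toList (PySem.Chars.lower result)
  then String.ofList (result ++ "\n\n*Disclaimer: This content is for informational purposes only. Past performance does not guarantee future results.*".toList)
  else String.ofList result

def ensure_compliance_alt (content : String) : String :=
  bFinish (bScan [] content.toList)

-- ===== PRECONDITION & SPEC =====
def Spec_ensure_compliance (content : String) (out : String) : Prop := out = ensure_compliance_alt content
instance (content : String) (out : String) : Decidable (Spec_ensure_compliance content out) := by unfold Spec_ensure_compliance; infer_instance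

-- ===== CLAIM (what is proved, stated in full; the proofs are below) =====
def Claim_equal_ensure_compliance : Prop := ∀ (content : String), Dom_ensure_compliance content → Spec_ensure_compliance content (ensure_compliance content)

-- ===== LEMMAS AND PROOFS =====

-- proof-only explicit char-list names for the rule texts (definitionally the port constants)
def pvK1 : List Char := ['g', 'u', 'a', 'r', 'a', 'n', 't', 'e', 'e', 'd', ' ', 'r', 'e', 't', 'u', 'r', 'n', 's']
def pvK2 : List Char := ['w', 'i', 'l', 'l', ' ', 'd', 'e', 'f', 'i', 'n', 'i', 't', 'e', 'l', 'y']
def pvK3 : List Char := ['r', 'i', 's', 'k', '-', 'f', 'r', 'e', 'e']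
def pvK4 : List Char := ['a', 's', 's', 'u', 'r', 'e', 'd', ' ', 'p', 'r', 'o', 'f', 'i', 't', 's']
def pvR1 : List Char := ['p', 'o', 't', 'e', 'n', 't', 'i', 'a', 'l', ' ', 'r', 'e', 't', 'u', 'r', 'n', 's']
def pvR2 : List Char := ['m', 'a', 'y']
def pvR3 : List Char := ['l', 'o', 'w', 'e', 'r', '-', 'r', 'i', 's', 'k']
def pvR4 : List Char := ['h', 'i', 's', 't', 'o', 'r', 'i', 'c', 'a', 'l', ' ', 'p', 'e', 'r', 'f', 'o', 'r', 'm', 'a', 'n', 'c', 'e']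

-- direct (non-accumulator) form of the single-pass scan, for the proofs
def scanD : List Char → List Char
  | [] => []
  | c :: t =>
    if pvK1.isPrefixOf (c :: t) then pvR1 ++ scanD (t.drop 17)
    else if pvK2.isPrefixOf (c :: t) then pvR2 ++ scanD (t.drop 14)
    else if pvK3.isPrefixOf (c :: t) then pvR3 ++ scanD (t.drop 8)
    else if pvK4.isPrefixOf (c :: t) then pvR4 ++ scanD (t.drop 14)
    else c :: scanD t
  termination_by l => l.length
  decreasing_by all_goals (simp [List.length_drop]; try omega)

-- clean structural form of Python's str.replace (for nonempty old; proofs only)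
def repl (old new : List Char) : List Char → List Char
  | [] => []
  | c :: t =>
    if old.isPrefixOf (c :: t) then new ++ repl old new (t.drop (old.length - 1))
    else c :: repl old new t
  termination_by l => l.length
  decreasing_by all_goals (simp [List.length_drop]; try omega)

theorem isPrefixOf_false {l₁ l₂ : List Char} (h : ¬ l₁ <+: l₂) : l₁.isPrefixOf l₂ = false := by
  rw [Bool.eq_false_iff]
  intro hb
  exact h (List.isPrefixOf_iff_prefix.mp hb)

theorem repl_nil (old new : List Char) : repl old new [] = [] := by simp [repl]

theorem repl_cons_pos (old new : List Char) (c : Char) (t : List Char)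
    (h : old <+: (c :: t)) :
    repl old new (c :: t) = new ++ repl old new (t.drop (old.length - 1)) := by
  simp only [repl]
  rw [if_pos (List.isPrefixOf_iff_prefix.mpr h)]

theorem repl_step (old new : List Char) (c : Char) (t : List Char)
    (h : ¬ old <+: (c :: t)) :
    repl old new (c :: t) = c :: repl old new t := by
  simp only [repl]
  rw [if_neg (by simp [isPrefixOf_false h])]

theorem repl_key (old new : List Char) (h : old ≠ []) (x : List Char) :
    repl old new (old ++ x) = new ++ repl old new x := by
  cases old with
  | nil => exact absurd rfl h
  | cons o os =>
    rw [List.cons_append, repl_cons_pos (o :: os) new o (os ++ x) ⟨x, by simp⟩]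
    simp

theorem goeq (old new : List Char) (fuel : Nat) (c : Char) (t acc : List Char) :
    PySem.Chars.replace.go old new (fuel+1) (c :: t) acc =
      if old.isPrefixOf (c :: t) then PySem.Chars.replace.go old new fuel ((c :: t).drop old.length) (new.reverse ++ acc)
      else PySem.Chars.replace.go old new fuel t (c :: acc) := by
  simp [PySem.Chars.replace.go]

theorem go_eq_repl (old new : List Char) (hold : old ≠ []) :
    ∀ fuel (l acc : List Char), l.length ≤ fuel →
      PySem.Chars.replace.go old new fuel l acc = acc.reverse ++ repl old new l := by
  intro fuel
  induction fuel with
  | zero =>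
    intro l acc hl
    have hnil : l = [] := by cases l <;> simp_all
    subst hnil
    simp [PySem.Chars.replace.go, repl_nil]
  | succ n ih =>
    intro l acc hl
    cases l with
    | nil => simp [PySem.Chars.replace.go, repl_nil]
    | cons c t =>
      rw [goeq]
      have hlen1 : 1 ≤ old.length := by cases old with | nil => exact absurd rfl hold | cons _ _ => simp
      by_cases hp : old <+: (c :: t)
      · rw [if_pos (List.isPrefixOf_iff_prefix.mpr hp)]
        have hdrop : (c :: t).drop old.length = t.drop (old.length - 1) := by
          cases old with
          | nil => exact absurd rfl hold
          | cons o os => simp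
        have hple : old.length ≤ (c :: t).length := hp.length_le
        have hle : ((c :: t).drop old.length).length ≤ n := by
          simp only [List.length_drop, List.length_cons]
          simp at hl hple
          omega
        rw [ih _ _ hle, hdrop, repl_cons_pos old new c t hp]
        simp
      · rw [if_neg (by simp [isPrefixOf_false hp])]
        have hle : t.length ≤ n := by simp at hl; omega
        rw [ih t (c :: acc) hle, repl_step old new c t hp]
        simp

theorem replace_eq_repl (old new : List Char) (hold : old ≠ []) (l : List Char) :
    PySem.Chars.replace l old new = repl old new l := by
  simp only [PySem.Chars.replace]
  rw [if_neg (by simp [hold])]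
  have := go_eq_repl old new hold l.length l [] le_rfl
  simpa using this

-- no occurrence of k can start strictly inside p (nor at its head), so replace passes p through
theorem repl_distrib (k r p : List Char)
    (hc : ∀ i < p.length, ¬ (p.drop i <+: k) ∧ ¬ (k <+: p.drop i)) :
    ∀ x, repl k r (p ++ x) = p ++ repl k r x := by
  induction p with
  | nil => intro x; simp
  | cons c p' ih =>
    intro x
    have hnp : ¬ k <+: (c :: (p' ++ x)) := by
      intro hk
      have h0 := hc 0 (by simp)
      simp only [List.drop_zero] at h0
      have hpp : (c :: p') <+: (c :: p') ++ x := ⟨x, rfl⟩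
      rcases Nat.le_total k.length (c :: p').length with hle | hle
      · exact h0.2 (List.prefix_of_prefix_length_le (by simpa using hk) hpp hle)
      · exact h0.1 (List.prefix_of_prefix_length_le hpp (by simpa using hk) hle)
    rw [List.cons_append, repl_step k r c (p' ++ x) hnp,
        ih (fun i hi => by simpa using hc (i+1) (by simpa using Nat.succ_lt_succ hi)) x]
    simp

-- replacing k by r cannot create a prefix q that was not already there,
-- provided q never aligns with r (no tail of q is a prefix of r, nor r a prefix of a tail of q)
theorem repl_noCreate (k r : List Char) :
    ∀ n (t q : List Char), t.length ≤ n →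
      (∀ i < q.length, ¬ (q.drop i <+: r) ∧ ¬ (r <+: q.drop i)) →
      ¬ q <+: t → ¬ q <+: repl k r t := by
  intro n
  induction n with
  | zero =>
    intro t q hl hc hq
    have hnil : t = [] := by cases t <;> simp_all
    subst hnil
    simpa [repl_nil] using hq
  | succ n ih =>
    intro t q hl hc hq
    cases t with
    | nil => simpa [repl_nil] using hq
    | cons c t' =>
      have hqne : q ≠ [] := by
        intro h; subst h; exact hq (List.nil_prefix)
      by_cases hp : k <+: (c :: t')
      · rw [repl_cons_pos k r c t' hp]
        intro habs
        have h0 := hc 0 (by cases q with | nil => exact absurd rfl hqne | cons _ _ => simp)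
        simp only [List.drop_zero] at h0
        have hrp : r <+: r ++ repl k r (t'.drop (k.length - 1)) := ⟨_, rfl⟩
        rcases Nat.le_total q.length r.length with hle | hle
        · exact h0.1 (List.prefix_of_prefix_length_le habs hrp hle)
        · exact h0.2 (List.prefix_of_prefix_length_le hrp habs hle)
      · rw [repl_step k r c t' hp]
        cases q with
        | nil => exact absurd rfl hqne
        | cons d q' =>
          intro habs
          rcases List.cons_prefix_cons.mp habs with ⟨hd, htail⟩
          subst hd
          have hq' : ¬ q' <+: t' := fun hh => hq (List.cons_prefix_cons.mpr ⟨rfl, hh⟩)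
          have hc' : ∀ i < q'.length, ¬ (q'.drop i <+: r) ∧ ¬ (r <+: q'.drop i) := by
            intro i hi
            simpa using hc (i+1) (by simpa using Nat.succ_lt_succ hi)
          exact ih t' q' (by simp at hl; omega) hc' hq' htail

-- the 18 disjointness/non-interaction facts of the concrete rules (checked by decide)
theorem cond_R1K2 : ∀ i < pvR1.length, ¬ (pvR1.drop i <+: pvK2) ∧ ¬ (pvK2 <+: pvR1.drop i) := by decide
theorem cond_R1K3 : ∀ i < pvR1.length, ¬ (pvR1.drop i <+: pvK3) ∧ ¬ (pvK3 <+: pvR1.drop i) := by decide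
theorem cond_R1K4 : ∀ i < pvR1.length, ¬ (pvR1.drop i <+: pvK4) ∧ ¬ (pvK4 <+: pvR1.drop i) := by decide
theorem cond_K2K1 : ∀ i < pvK2.length, ¬ (pvK2.drop i <+: pvK1) ∧ ¬ (pvK1 <+: pvK2.drop i) := by decide
theorem cond_R2K3 : ∀ i < pvR2.length, ¬ (pvR2.drop i <+: pvK3) ∧ ¬ (pvK3 <+: pvR2.drop i) := by decide
theorem cond_R2K4 : ∀ i < pvR2.length, ¬ (pvR2.drop i <+: pvK4) ∧ ¬ (pvK4 <+: pvR2.drop i) := by decide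
theorem cond_K3K1 : ∀ i < pvK3.length, ¬ (pvK3.drop i <+: pvK1) ∧ ¬ (pvK1 <+: pvK3.drop i) := by decide
theorem cond_K3K2 : ∀ i < pvK3.length, ¬ (pvK3.drop i <+: pvK2) ∧ ¬ (pvK2 <+: pvK3.drop i) := by decide
theorem cond_R3K4 : ∀ i < pvR3.length, ¬ (pvR3.drop i <+: pvK4) ∧ ¬ (pvK4 <+: pvR3.drop i) := by decide
theorem cond_K4K1 : ∀ i < pvK4.length, ¬ (pvK4.drop i <+: pvK1) ∧ ¬ (pvK1 <+: pvK4.drop i) := by decide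
theorem cond_K4K2 : ∀ i < pvK4.length, ¬ (pvK4.drop i <+: pvK2) ∧ ¬ (pvK2 <+: pvK4.drop i) := by decide
theorem cond_K4K3 : ∀ i < pvK4.length, ¬ (pvK4.drop i <+: pvK3) ∧ ¬ (pvK3 <+: pvK4.drop i) := by decide
theorem cond_K2T_R1 : ∀ i < (pvK2.drop 1).length, ¬ ((pvK2.drop 1).drop i <+: pvR1) ∧ ¬ (pvR1 <+: (pvK2.drop 1).drop i) := by decide
theorem cond_K3T_R1 : ∀ i < (pvK3.drop 1).length, ¬ ((pvK3.drop 1).drop i <+: pvR1) ∧ ¬ (pvR1 <+: (pvK3.drop 1).drop i) := by decide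
theorem cond_K3T_R2 : ∀ i < (pvK3.drop 1).length, ¬ ((pvK3.drop 1).drop i <+: pvR2) ∧ ¬ (pvR2 <+: (pvK3.drop 1).drop i) := by decide
theorem cond_K4T_R1 : ∀ i < (pvK4.drop 1).length, ¬ ((pvK4.drop 1).drop i <+: pvR1) ∧ ¬ (pvR1 <+: (pvK4.drop 1).drop i) := by decide
theorem cond_K4T_R2 : ∀ i < (pvK4.drop 1).length, ¬ ((pvK4.drop 1).drop i <+: pvR2) ∧ ¬ (pvR2 <+: (pvK4.drop 1).drop i) := by decide
theorem cond_K4T_R3 : ∀ i < (pvK4.drop 1).length, ¬ ((pvK4.drop 1).drop i <+: pvR3) ∧ ¬ (pvR3 <+: (pvK4.drop 1).drop i) := by decide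

-- evaluation of scanD at each key and at a non-matching head
theorem scanD_key1 (x : List Char) : scanD (pvK1 ++ x) = pvR1 ++ scanD x := by
  simp [pvK1, scanD, List.isPrefixOf]

theorem scanD_key2 (x : List Char) : scanD (pvK2 ++ x) = pvR2 ++ scanD x := by
  simp [pvK1, pvK2, scanD, List.isPrefixOf]

theorem scanD_key3 (x : List Char) : scanD (pvK3 ++ x) = pvR3 ++ scanD x := by
  simp [pvK1, pvK2, pvK3, scanD, List.isPrefixOf]

theorem scanD_key4 (x : List Char) : scanD (pvK4 ++ x) = pvR4 ++ scanD x := by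
  simp [pvK1, pvK2, pvK3, pvK4, scanD, List.isPrefixOf]

theorem scanD_cons (c : Char) (t : List Char)
    (h1 : ¬ pvK1 <+: (c :: t)) (h2 : ¬ pvK2 <+: (c :: t))
    (h3 : ¬ pvK3 <+: (c :: t)) (h4 : ¬ pvK4 <+: (c :: t)) :
    scanD (c :: t) = c :: scanD t := by
  simp only [scanD]
  rw [if_neg (by simp [isPrefixOf_false h1]), if_neg (by simp [isPrefixOf_false h2]),
      if_neg (by simp [isPrefixOf_false h3]), if_neg (by simp [isPrefixOf_false h4])]

-- the main equivalence on char lists: the four sequential replaces equal the single scan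
theorem scan_eq : ∀ n (l : List Char), l.length ≤ n →
    repl pvK4 pvR4 (repl pvK3 pvR3 (repl pvK2 pvR2 (repl pvK1 pvR1 l))) = scanD l := by
  intro n
  induction n with
  | zero =>
    intro l hl
    have hnil : l = [] := by cases l <;> simp_all
    subst hnil
    simp [repl_nil, scanD]
  | succ n ih =>
    intro l hl
    cases l with
    | nil => simp [repl_nil, scanD]
    | cons c t =>
      by_cases h1 : pvK1 <+: (c :: t)
      · obtain ⟨x, hx⟩ := h1
        rw [← hx, repl_key pvK1 pvR1 (by decide) x,
            repl_distrib pvK2 pvR2 pvR1 cond_R1K2,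
            repl_distrib pvK3 pvR3 pvR1 cond_R1K3,
            repl_distrib pvK4 pvR4 pvR1 cond_R1K4,
            scanD_key1]
        have hx' : x.length ≤ n := by
          have := congrArg List.length hx; simp [pvK1] at this hl; omega
        rw [ih x hx']
      by_cases h2 : pvK2 <+: (c :: t)
      · obtain ⟨x, hx⟩ := h2
        rw [← hx, repl_distrib pvK1 pvR1 pvK2 cond_K2K1,
            repl_key pvK2 pvR2 (by decide),
            repl_distrib pvK3 pvR3 pvR2 cond_R2K3,
            repl_distrib pvK4 pvR4 pvR2 cond_R2K4,
            scanD_key2]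
        have hx' : x.length ≤ n := by
          have := congrArg List.length hx; simp [pvK2] at this hl; omega
        rw [ih x hx']
      by_cases h3 : pvK3 <+: (c :: t)
      · obtain ⟨x, hx⟩ := h3
        rw [← hx, repl_distrib pvK1 pvR1 pvK3 cond_K3K1,
            repl_distrib pvK2 pvR2 pvK3 cond_K3K2,
            repl_key pvK3 pvR3 (by decide),
            repl_distrib pvK4 pvR4 pvR3 cond_R3K4,
            scanD_key3]
        have hx' : x.length ≤ n := by
          have := congrArg List.length hx; simp [pvK3] at this hl; omega
        rw [ih x hx']
      by_cases h4 : pvK4 <+: (c :: t)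
      · obtain ⟨x, hx⟩ := h4
        rw [← hx, repl_distrib pvK1 pvR1 pvK4 cond_K4K1,
            repl_distrib pvK2 pvR2 pvK4 cond_K4K2,
            repl_distrib pvK3 pvR3 pvK4 cond_K4K3,
            repl_key pvK4 pvR4 (by decide),
            scanD_key4]
        have hx' : x.length ≤ n := by
          have := congrArg List.length hx; simp [pvK4] at this hl; omega
        rw [ih x hx']
      -- no key matches at this position: every pass copies c
      have ht : t.length ≤ n := by simp at hl; omega
      have h2' : ¬ pvK2 <+: (c :: repl pvK1 pvR1 t) := by
        intro hp
        rcases List.cons_prefix_cons.mp hp with ⟨hd, htail⟩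
        have hsplit : pvK2 = 'w' :: pvK2.drop 1 := rfl
        have hq : ¬ (pvK2.drop 1) <+: t := by
          intro hh
          apply h2
          rw [hsplit, hd]
          exact List.cons_prefix_cons.mpr ⟨rfl, hh⟩
        exact repl_noCreate pvK1 pvR1 t.length t (pvK2.drop 1) le_rfl cond_K2T_R1 hq htail
      have h3' : ¬ pvK3 <+: (c :: repl pvK2 pvR2 (repl pvK1 pvR1 t)) := by
        intro hp
        rcases List.cons_prefix_cons.mp hp with ⟨hd, htail⟩
        have hsplit : pvK3 = 'r' :: pvK3.drop 1 := rfl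
        have hq : ¬ (pvK3.drop 1) <+: t := by
          intro hh
          apply h3
          rw [hsplit, hd]
          exact List.cons_prefix_cons.mpr ⟨rfl, hh⟩
        have hq1 : ¬ (pvK3.drop 1) <+: repl pvK1 pvR1 t :=
          repl_noCreate pvK1 pvR1 t.length t (pvK3.drop 1) le_rfl cond_K3T_R1 hq
        exact repl_noCreate pvK2 pvR2 _ _ (pvK3.drop 1) le_rfl cond_K3T_R2 hq1 htail
      have h4' : ¬ pvK4 <+: (c :: repl pvK3 pvR3 (repl pvK2 pvR2 (repl pvK1 pvR1 t))) := by
        intro hp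
        rcases List.cons_prefix_cons.mp hp with ⟨hd, htail⟩
        have hsplit : pvK4 = 'a' :: pvK4.drop 1 := rfl
        have hq : ¬ (pvK4.drop 1) <+: t := by
          intro hh
          apply h4
          rw [hsplit, hd]
          exact List.cons_prefix_cons.mpr ⟨rfl, hh⟩
        have hq1 : ¬ (pvK4.drop 1) <+: repl pvK1 pvR1 t :=
          repl_noCreate pvK1 pvR1 t.length t (pvK4.drop 1) le_rfl cond_K4T_R1 hq
        have hq2 : ¬ (pvK4.drop 1) <+: repl pvK2 pvR2 (repl pvK1 pvR1 t) :=
          repl_noCreate pvK2 pvR2 _ _ (pvK4.drop 1) le_rfl cond_K4T_R2 hq1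
        exact repl_noCreate pvK3 pvR3 _ _ (pvK4.drop 1) le_rfl cond_K4T_R3 hq2 htail
      rw [repl_step pvK1 pvR1 c t h1, repl_step pvK2 pvR2 _ _ h2',
          repl_step pvK3 pvR3 _ _ h3', repl_step pvK4 pvR4 _ _ h4',
          scanD_cons c t h1 h2 h3 h4, ih t ht]

-- the port constants are the proof constants (same string texts)
theorem bKeq1 : bK1 = pvK1 := rfl
theorem bKeq2 : bK2 = pvK2 := rfl
theorem bKeq3 : bK3 = pvK3 := rfl
theorem bKeq4 : bK4 = pvK4 := rfl
theorem bReq1 : bR1 = pvR1 := rfl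
theorem bReq2 : bR2 = pvR2 := rfl
theorem bReq3 : bR3 = pvR3 := rfl
theorem bReq4 : bR4 = pvR4 := rfl

-- Source B's accumulator scan equals the direct scan with the parts prepended
theorem bScan_eq_scanD : ∀ n (l : List Char), l.length ≤ n →
    ∀ parts, bScan parts l = parts ++ scanD l := by
  intro n
  induction n with
  | zero =>
    intro l hl parts
    have hnil : l = [] := by cases l <;> simp_all
    subst hnil
    simp [bScan, scanD]
  | succ n ih =>
    intro l hl parts
    cases l with
    | nil => simp [bScan, scanD]
    | cons c t =>
      have hl' : t.length ≤ n := by simp at hl; omega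
      simp only [bScan, scanD, bKeq1, bKeq2, bKeq3, bKeq4, bReq1, bReq2, bReq3, bReq4]
      split_ifs with h1 h2 h3 h4
      · rw [ih (t.drop 17) (by simp [List.length_drop]; omega) (parts ++ pvR1)]
        simp
      · rw [ih (t.drop 14) (by simp [List.length_drop]; omega) (parts ++ pvR2)]
        simp
      · rw [ih (t.drop 8) (by simp [List.length_drop]; omega) (parts ++ pvR3)]
        simp
      · rw [ih (t.drop 14) (by simp [List.length_drop]; omega) (parts ++ pvR4)]
        simp
      · rw [ih t hl' (parts ++ [c])]
        simp

-- ===== VERDICT (by name: the statement is the Claim_ definition above) =====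
theorem ensure_compliance_spec : Claim_equal_ensure_compliance := by
  intro content _
  unfold Spec_ensure_compliance ensure_compliance ensure_compliance_alt
  have hmain : aRepls.foldl (fun acc p => PySem.Chars.replace acc p.1 p.2) content.toList
      = bScan [] content.toList := by
    rw [bScan_eq_scanD content.toList.length content.toList le_rfl []]
    simp only [aRepls, List.foldl]
    rw [replace_eq_repl ("guaranteed returns".toList) ("potential returns".toList) (by decide),
        replace_eq_repl ("will definitely".toList) ("may".toList) (by decide),
        replace_eq_repl ("risk-free".toList) ("lower-risk".toList) (by decide),
        replace_eq_repl ("assured profits".toList) ("historical performance".toList) (by decide)]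
    show repl pvK4 pvR4 (repl pvK3 pvR3 (repl pvK2 pvR2 (repl pvK1 pvR1 content.toList)))
        = [] ++ scanD content.toList
    rw [List.nil_append]
    exact scan_eq content.toList.length content.toList le_rfl
  rw [hmain]
  unfold aFinish bFinish
  split_ifs <;> simp_all
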